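-- pv_equiv track=rewrite | github.com/vuhuy1804/PYTHON_PTIT | PYKT072_XoayVongXauKyTu.py | solve
-- ===== SOURCE A (Python) =====
-- def xoay(s):
--     t = s[1:] + s[0]
--     return t
--
-- def solve(a, n):
--     ans = 10**9
--     for i in range(n):
--         res = 0
--         for j in range(n):
--             if a[i] == a[j]: continue
--             tmp = a[j]
--             cnt = 0
--             while(tmp != a[i]):
--                 tmp = xoay(tmp)
--                 cnt += 1
--                 if cnt > len(tmp):
--                     return -1
--             res += cnt
--         ans = min(ans, res)
--     return ans
-- ===== SOURCE B (Python) =====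
-- def shift(s, t):
--     # minimal k >= 0 with s[k:] + s[:k] == t, found as the first occurrence
--     # of t in the doubled string s+s; -1 if t is not a rotation of s
--     if len(s) != len(t):
--         return -1
--     return (s + s).find(t)
--
-- def solve(a, n):
--     targets = set()
--     for j in range(n):
--         if shift(a[j], a[0]) < 0:   # not a cyclic rotation of the first string
--             return -1
--         targets.add(a[j])
--     best = 10 ** 9
--     for t in targets:               # one row per DISTINCT string only
--         total = 0
--         for j in range(n):
--             total += shift(a[j], t)
--         best = min(best, total)
--     return best
-- ===== Notes on version B (the rewrite author's own statement) =====
-- stated objective: faster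
-- what changed: A's per-pair rotate-one-step-and-compare while loop (up to L rotations, each rebuilding the string) is replaced by one substring search per string in the doubled string s+s (whose first occurrence index is exactly the minimal rotation count), done once per string to validate against a[0], and the candidate-target loop runs once per DISTINCT string instead of once per index.
import Mathlib
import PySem

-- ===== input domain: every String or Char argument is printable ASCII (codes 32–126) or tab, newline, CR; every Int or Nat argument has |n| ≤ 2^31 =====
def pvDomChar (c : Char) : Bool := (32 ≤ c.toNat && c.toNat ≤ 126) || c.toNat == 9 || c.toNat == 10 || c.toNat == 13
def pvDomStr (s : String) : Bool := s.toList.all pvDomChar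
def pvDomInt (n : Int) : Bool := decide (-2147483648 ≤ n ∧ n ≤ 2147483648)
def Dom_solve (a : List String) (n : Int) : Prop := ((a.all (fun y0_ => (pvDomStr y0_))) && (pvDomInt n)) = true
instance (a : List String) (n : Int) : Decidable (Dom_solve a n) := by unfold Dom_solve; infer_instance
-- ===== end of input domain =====

-- B validates every string as a rotation of the first in one pass (one substring search in
-- the doubled string per string: the first occurrence index of t in s+s is the minimal
-- rotation count), then evaluates one row sum per DISTINCT target only; objective: faster.

-- ===== PORT A =====
-- xoay(s) = s[1:] + s[0]  (on "" Python raises IndexError — excluded by Pre_solve; the port returns "")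
def xoay (s : String) : String :=
  String.ofList (PySem.List.slice s.toList (some 1) none ++
    ((PySem.List.pyGet? s.toList 0).elim [] (fun c => [c])))

-- the 'while tmp != a[i]' loop; 'none' = the global 'return -1'; fuel only makes it total
-- (called with len+2, which the cnt > len(tmp) bail-out never exceeds)
def whileA (target tmp : String) (cnt fuel : Nat) : Option Nat :=
  match fuel with
  | 0 => none
  | fuel' + 1 =>
    if tmp = target then some cnt
    else if (xoay tmp).toList.length < cnt + 1 then none
    else whileA target (xoay tmp) (cnt + 1) fuel'

-- the 'for j in range(n)' loop accumulating res; 'none' = 'return -1'.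
-- range(n) is iterated lazily in Python, so the loop is ported as a count-down with the
-- running index j (rem = number of iterations left), not as a materialised index list.
def innerA (a : List String) (target : String) : Nat → Int → Int → Option Int
  | 0, _, res => some res
  | rem + 1, j, res =>
    if target = (PySem.List.pyGet? a j).getD "" then innerA a target rem (j + 1) res
    else
      match whileA target ((PySem.List.pyGet? a j).getD "") 0
          (((PySem.List.pyGet? a j).getD "").toList.length + 2) with
      | none => none
      | some cnt => innerA a target rem (j + 1) (res + (cnt : Int))

-- the 'for i in range(n)' loop tracking ans (same lazy count-down shape)
def outerA (a : List String) (n : Nat) : Nat → Int → Int → Int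
  | 0, _, ans => ans
  | rem + 1, i, ans =>
    match innerA a ((PySem.List.pyGet? a i).getD "") n 0 0 with
    | none => -1
    | some res => outerA a n rem (i + 1) (min ans res)

def solve (a : List String) (n : Int) : Int :=
  outerA a n.toNat n.toNat 0 ((10 : Int) ^ 9)

-- ===== PORT B =====
-- shift(s, t) = -1 if lengths differ else (s+s).find(t)
def shiftRot (s t : String) : Int :=
  if s.toList.length ≠ t.toList.length then -1
  else PySem.Chars.find (s.toList ++ s.toList) t.toList

-- validation + dedup loop 'for j in range(n)'; 'none' = 'return -1';
-- range(n) iterated lazily: count-down rem with running index j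
def buildTargets (a : List String) : Nat → Int → PySem.Set String → Option (PySem.Set String)
  | 0, _, ts => some ts
  | rem + 1, j, ts =>
    if shiftRot ((PySem.List.pyGet? a j).getD "") ((PySem.List.pyGet? a 0).getD "") < 0 then none
    else buildTargets a rem (j + 1)
      (PySem.Set.add ts ((PySem.List.pyGet? a j).getD ""))

-- the row sum 'for j in range(n): total += shift(a[j], t)'
def rowB (a : List String) (t : String) : Nat → Int → Int → Int
  | 0, _, tot => tot
  | rem + 1, j, tot => rowB a t rem (j + 1) (tot + shiftRot ((PySem.List.pyGet? a j).getD "") t)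

-- 'for t in targets' tracking best (a min over the set: order-independent)
def bestB (a : List String) (n : Nat) : List String → Int → Int
  | [], best => best
  | t :: ts, best => bestB a n ts (min best (rowB a t n 0 0))

def solve_alt (a : List String) (n : Int) : Int :=
  match buildTargets a n.toNat 0 PySem.Set.empty with
  | none => -1
  | some ts => bestB a n.toNat ts ((10 : Int) ^ 9)

-- ===== PRECONDITION & SPEC =====
-- helper for Pre_: s is cyclically rotatable onto t
def rotEqB (s t : String) : Bool :=
  (List.range (s.toList.length + 1)).any (fun k => s.toList.rotate k == t.toList)

-- Pre_solve holds exactly where Python A returns normally; it excludes exactly the inputs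
-- where A raises IndexError (an index i or j of range(n) beyond len(a) reached before any
-- 'return -1' pair, or xoay('') reached because the first string of a not rotation-equal
-- to a[0] is '' while a[0] is not). It excludes no input on which A returns.
def Pre_solve (a : List String) (n : Int) : Prop :=
  n ≤ 0 ∨ (0 < a.length ∧
    ((∃ j ∈ List.range a.length, (j : Int) < n ∧
        rotEqB (a.getD j "") (a.getD 0 "") = false ∧ a.getD j "" ≠ "" ∧
        ∀ j' ∈ List.range j, rotEqB (a.getD j' "") (a.getD 0 "") = true)
     ∨ (n ≤ (a.length : Int) ∧
        ∀ j ∈ List.range a.length, (j : Int) < n → rotEqB (a.getD j "") (a.getD 0 "") = true)))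
instance (a : List String) (n : Int) : Decidable (Pre_solve a n) := by
  unfold Pre_solve; infer_instance

def pvWitness_solve : List String × Int := (["ab", "ba"], 2)

def Spec_solve (a : List String) (n : Int) (out : Int) : Prop := out = solve_alt a n
instance (a : List String) (n : Int) (out : Int) : Decidable (Spec_solve a n out) := by
  unfold Spec_solve; infer_instance

-- ===== CLAIM (what is proved, stated in full; the proofs are below) =====
def Claim_equal_solve : Prop := ∀ (a : List String) (n : Int), Dom_solve a n → Pre_solve a n → Spec_solve a n (solve a n)

-- ===== LEMMAS AND PROOFS =====

lemma toList_xoay (s : String) : (xoay s).toList = s.toList.rotate 1 := by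
  cases h : s.toList with
  | nil => simp [xoay, h, PySem.List.slice_from_one, PySem.List.pyGet?]
  | cons c cs =>
    simp [xoay, h, PySem.List.slice_from_one, PySem.List.pyGet?, PySem.List.pyIdx?,
      List.rotate_cons_succ]

lemma ofList_inj {l₁ l₂ : List Char} (h : String.ofList l₁ = String.ofList l₂) : l₁ = l₂ := by
  have := congrArg String.toList h; simpa using this

lemma whileA_char (t s : List Char) :
    ∀ (fuel cnt : Nat), fuel + cnt = s.length + 2 → cnt ≤ s.length →
    whileA (String.ofList t) (String.ofList (s.rotate cnt)) cnt fuel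
      = (List.range' cnt (s.length + 1 - cnt)).find? (fun k => s.rotate k == t) := by
  intro fuel
  induction fuel with
  | zero => intro cnt h hc; omega
  | succ fuel ih =>
    intro cnt h hc
    have hrange : s.length + 1 - cnt = (s.length - cnt) + 1 := by omega
    rw [whileA, hrange, List.range'_succ]
    by_cases heq : String.ofList (s.rotate cnt) = String.ofList t
    · have hrot : s.rotate cnt = t := ofList_inj heq
      simp [hrot]
    · have hrot : ¬ (s.rotate cnt = t) := fun hh => heq (by rw [hh])
      have hlen : (xoay (String.ofList (s.rotate cnt))).toList.length = s.length := by
        rw [toList_xoay]; simp [List.length_rotate]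
      rw [if_neg heq, hlen]
      by_cases hbail : s.length < cnt + 1
      · have hcnt : cnt = s.length := by omega
        have hsub : s.length - cnt = 0 := by omega
        rw [if_pos hbail, hsub]
        have hst : (s == t) = false := by
          rw [beq_eq_false_iff_ne]
          intro hh; apply hrot; rw [hcnt, List.rotate_length, hh]
        simp [hcnt, List.rotate_length, hst]
      · have hx : xoay (String.ofList (s.rotate cnt)) = String.ofList (s.rotate (cnt + 1)) := by
          have : (xoay (String.ofList (s.rotate cnt))).toList = s.rotate (cnt + 1) := by
            rw [toList_xoay]; simp [List.rotate_rotate]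
          calc xoay (String.ofList (s.rotate cnt))
              = String.ofList (xoay (String.ofList (s.rotate cnt))).toList := by simp
            _ = String.ofList (s.rotate (cnt + 1)) := by rw [this]
        rw [if_neg hbail, hx, ih (cnt + 1) (by omega) (by omega)]
        have : s.length + 1 - (cnt + 1) = s.length - cnt := by omega
        rw [this]
        simp [hrot]

lemma whileA_eq_find? (S T : String) :
    whileA T S 0 (S.toList.length + 2)
      = (List.range' 0 (S.toList.length + 1)).find? (fun k => S.toList.rotate k == T.toList) := by
  have h := whileA_char T.toList S.toList (S.toList.length + 2) 0 (by omega) (by omega)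
  simpa using h

lemma prefix_drop_iff (s t : List Char) (hL : s.length = t.length) (hpos : 0 < s.length)
    (j : Nat) : t <+: (s ++ s).drop j ↔ (j ≤ s.length ∧ s.rotate j = t) := by
  constructor
  · intro h
    have hlen := h.length_le
    simp only [List.length_drop, List.length_append, ← hL] at hlen
    have hj : j ≤ s.length := by omega
    have hdrop : (s ++ s).drop j = s.drop j ++ s := List.drop_append_of_le_length hj
    have ht : t = ((s ++ s).drop j).take t.length := List.prefix_iff_eq_take.mp h
    rw [hdrop, List.take_append] at ht
    have h1 : (s.drop j).take t.length = s.drop j := by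
      apply List.take_of_length_le; simp [List.length_drop]; omega
    have h2 : t.length - (s.drop j).length = j := by simp [List.length_drop]; omega
    rw [h1, h2] at ht
    refine ⟨hj, ?_⟩
    rw [List.rotate_eq_drop_append_take hj, ht]
  · rintro ⟨hj, hrot⟩
    have hsplit : (s ++ s).drop j = (s.drop j ++ s.take j) ++ s.drop j := by
      rw [List.drop_append_of_le_length hj, List.append_assoc, List.take_append_drop]
    rw [hsplit, ← hrot, List.rotate_eq_drop_append_take hj]
    exact List.prefix_append _ _

lemma find?_range'_some {p : Nat → Bool} {st len k : Nat}
    (h : (List.range' st len).find? p = some k) :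
    p k = true ∧ st ≤ k ∧ k < st + len ∧ ∀ i, st ≤ i → i < k → p i = false := by
  induction len generalizing st with
  | zero => simp [List.range'] at h
  | succ len ih =>
    rw [List.range'_succ, List.find?_cons] at h
    cases hp : p st with
    | true =>
      rw [hp] at h
      obtain rfl : st = k := by simpa using h
      exact ⟨hp, le_refl _, by omega, fun i h1 h2 => by omega⟩
    | false =>
      rw [hp] at h
      obtain ⟨h1, h2, h3, h4⟩ := ih h
      refine ⟨h1, by omega, by omega, fun i hi1 hi2 => ?_⟩
      rcases Nat.eq_or_lt_of_le hi1 with rfl | hlt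
      · exact hp
      · exact h4 i hlt hi2

lemma find_doubled (s t : List Char) (hL : s.length = t.length) :
    PySem.Chars.find (s ++ s) t =
      match (List.range' 0 (s.length + 1)).find? (fun k => s.rotate k == t) with
      | some k => (k : Int)
      | none => -1 := by
  by_cases hpos : s.length = 0
  · have hs : s = [] := List.length_eq_zero_iff.mp hpos
    have ht : t = [] := List.length_eq_zero_iff.mp (by omega)
    subst hs; subst ht; decide
  · have hpos' : 0 < s.length := by omega
    cases hfk : (List.range' 0 (s.length + 1)).find? (fun k => s.rotate k == t) with
    | some k =>
      obtain ⟨hpk, -, hk, hmin⟩ := find?_range'_some hfk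
      have hk' : k ≤ s.length := by omega
      have hrot : s.rotate k = t := by simpa using hpk
      have hpre : t <+: (s ++ s).drop k := (prefix_drop_iff s t hL hpos' k).mpr ⟨hk', hrot⟩
      have hin : PySem.Chars.isIn t (s ++ s) = true :=
        (PySem.Chars.exists_prefix_drop_iff_isIn t (s ++ s)).mp ⟨k, hpre⟩
      have hnn : 0 ≤ PySem.Chars.find (s ++ s) t :=
        (PySem.Chars.find_nonneg_iff (s ++ s) t).mpr ((PySem.Chars.isIn_iff_infix t (s ++ s)).mp hin)
      obtain ⟨hf1, hf2⟩ := PySem.Chars.find_spec hnn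
      set f : Nat := (PySem.Chars.find (s ++ s) t).toNat with hf
      have hfk2 : f = k := by
        rcases lt_trichotomy f k with hlt | heq | hgt
        · exfalso
          obtain ⟨-, hfr⟩ := (prefix_drop_iff s t hL hpos' f).mp hf1
          have hmf := hmin f (by omega) hlt
          simp [hfr] at hmf
        · exact heq
        · exact absurd hpre (hf2 k hgt)
      have hval : PySem.Chars.find (s ++ s) t = ((f : Nat) : Int) :=
        (Int.toNat_of_nonneg hnn).symm
      simp [hval, hfk2]
    | none =>
      have hall := List.find?_eq_none.mp hfk
      have hnone : ∀ j, ¬ t <+: (s ++ s).drop j := by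
        intro j hpre
        obtain ⟨hj, hrot⟩ := (prefix_drop_iff s t hL hpos' j).mp hpre
        have hmem : j ∈ List.range' 0 (s.length + 1) := by
          rw [List.mem_range'_1]; omega
        have := hall j hmem
        simp [hrot] at this
      have hni : ¬ t <:+: (s ++ s) := by
        intro hinf
        obtain ⟨j, hj⟩ := (PySem.Chars.exists_prefix_drop_iff_isIn t (s ++ s)).mpr
          ((PySem.Chars.isIn_iff_infix t (s ++ s)).mpr hinf)
        exact hnone j hj
      have hfind : PySem.Chars.find (s ++ s) t = -1 :=
        (PySem.Chars.find_eq_neg_one_iff (s ++ s) t).mpr hni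
      simpa using hfind


lemma shiftRot_self (x : String) : shiftRot x x = 0 := by
  unfold shiftRot
  rw [if_neg (by simp), find_doubled x.toList x.toList rfl]
  simp [List.range'_succ, List.rotate_zero]


-- proof-only abbreviation: the value of a[k] as the ports read it
def aval (a : List String) (k : Int) : String := (PySem.List.pyGet? a k).getD ""

lemma aval_def (a : List String) (k : Int) : (PySem.List.pyGet? a k).getD "" = aval a k := rfl

lemma aval_getD (a : List String) (j : Nat) : aval a (j : Int) = a.getD j "" := by
  simp [aval, PySem.List.pyGet?_natCast, List.getD_eq_getElem?_getD]

def rowSum (a : List String) (N : Nat) (t : String) : Int :=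
  ((List.range' 0 N).map (fun k : Nat => shiftRot (aval a (k : Int)) t)).sum

lemma whileA_shift (s t : String) :
    (whileA t s 0 (s.toList.length + 2)).map (fun c => (c : Int))
      = if shiftRot s t < 0 then none else some (shiftRot s t) := by
  by_cases hlen : s.toList.length = t.toList.length
  · have hfd : shiftRot s t =
        match (List.range' 0 (s.toList.length + 1)).find?
            (fun k => s.toList.rotate k == t.toList) with
        | some k => (k : Int)
        | none => -1 := by
      unfold shiftRot; rw [if_neg (by omega), find_doubled _ _ hlen]
    rw [whileA_eq_find?]
    cases hres : (List.range' 0 (s.toList.length + 1)).find?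
        (fun k => s.toList.rotate k == t.toList) with
    | some k =>
      rw [hres] at hfd; simp only at hfd
      rw [hfd, if_neg (not_lt.mpr (Int.natCast_nonneg k))]
      rfl
    | none =>
      rw [hres] at hfd; simp only at hfd
      rw [hfd, if_pos (by omega)]
      rfl
  · have hsh : shiftRot s t = -1 := by unfold shiftRot; rw [if_pos hlen]
    rw [hsh, if_pos (by omega), whileA_eq_find?]
    have hfn : (List.range' 0 (s.toList.length + 1)).find?
        (fun k => s.toList.rotate k == t.toList) = none := by
      rw [List.find?_eq_none]
      intro k _ hcon
      apply hlen
      have hkeq : s.toList.rotate k = t.toList := by simpa using hcon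
      simpa [List.length_rotate] using congrArg List.length hkeq
    rw [hfn]
    rfl

lemma whileA_none_of_neg (s t : String) (h : shiftRot s t < 0) :
    whileA t s 0 (s.toList.length + 2) = none := by
  have hmap := whileA_shift s t
  rw [if_pos h] at hmap
  cases hw : whileA t s 0 (s.toList.length + 2) with
  | none => rfl
  | some c => rw [hw] at hmap; simp at hmap

lemma whileA_some_of_nonneg (s t : String) (h : 0 ≤ shiftRot s t) :
    ∃ c : Nat, whileA t s 0 (s.toList.length + 2) = some c ∧ (c : Int) = shiftRot s t := by
  have hmap := whileA_shift s t
  rw [if_neg (not_lt.mpr h)] at hmap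
  cases hw : whileA t s 0 (s.toList.length + 2) with
  | none => rw [hw] at hmap; simp at hmap
  | some c =>
    rw [hw] at hmap
    exact ⟨c, rfl, by simpa using hmap⟩

lemma exists_small_rotate (s t : List Char) (h : ∃ nn, s.rotate nn = t) :
    ∃ k, k < s.length + 1 ∧ s.rotate k = t := by
  obtain ⟨nn, hr⟩ := h
  by_cases h0 : s.length = 0
  · have hs : s = [] := List.length_eq_zero_iff.mp h0
    subst hs
    exact ⟨0, by omega, by simpa [List.rotate_nil] using hr⟩
  · refine ⟨nn % s.length, ?_, ?_⟩
    · have := Nat.mod_lt nn (show 0 < s.length by omega); omega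
    · rw [List.rotate_mod]; exact hr

lemma shiftRot_nonneg_iff (s t : String) : 0 ≤ shiftRot s t ↔ s.toList ~r t.toList := by
  constructor
  · intro h
    by_cases hlen : s.toList.length = t.toList.length
    · have hfd := find_doubled s.toList t.toList hlen
      unfold shiftRot at h
      rw [if_neg (by omega), hfd] at h
      cases hres : (List.range' 0 (s.toList.length + 1)).find?
          (fun k => s.toList.rotate k == t.toList) with
      | none => rw [hres] at h; simp at h
      | some k =>
        obtain ⟨hpk, -, -, -⟩ := find?_range'_some hres
        exact ⟨k, by simpa using hpk⟩
    · exfalso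
      unfold shiftRot at h
      rw [if_pos hlen] at h
      omega
  · intro hr
    obtain ⟨k, hk, hrot⟩ := exists_small_rotate s.toList t.toList hr
    have hlen : s.toList.length = t.toList.length := by
      simpa [List.length_rotate] using congrArg List.length hrot
    unfold shiftRot
    rw [if_neg (by omega), find_doubled _ _ hlen]
    cases hres : (List.range' 0 (s.toList.length + 1)).find?
        (fun k => s.toList.rotate k == t.toList) with
    | some k' => simp only []; exact Int.natCast_nonneg k'
    | none =>
      exfalso
      have hbad := List.find?_eq_none.mp hres k (by rw [List.mem_range'_1]; omega)
      simp [hrot] at hbad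

lemma rotEqB_iff (s t : String) : rotEqB s t = true ↔ s.toList ~r t.toList := by
  unfold rotEqB
  rw [List.any_eq_true]
  constructor
  · rintro ⟨k, -, hk⟩
    exact ⟨k, by simpa using hk⟩
  · intro hr
    obtain ⟨k, hklt, hrot⟩ := exists_small_rotate s.toList t.toList hr
    exact ⟨k, List.mem_range.mpr hklt, by simpa using hrot⟩

lemma shiftRot_neg_iff (s t : String) : shiftRot s t < 0 ↔ rotEqB s t = false := by
  constructor
  · intro h
    cases hb : rotEqB s t with
    | false => rfl
    | true =>
      exfalso
      have := (shiftRot_nonneg_iff s t).mpr ((rotEqB_iff s t).mp hb)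
      omega
  · intro hb
    by_contra hc
    rw [not_lt] at hc
    have := (rotEqB_iff s t).mpr ((shiftRot_nonneg_iff s t).mp hc)
    rw [this] at hb
    exact Bool.noConfusion hb

lemma innerA_none (a : List String) (t : String) :
    ∀ (rem m : Nat) (res : Int),
      (∃ k ∈ List.range' m rem, shiftRot (aval a (k : Int)) t < 0) →
      innerA a t rem (m : Int) res = none := by
  intro rem
  induction rem with
  | zero => intro m res h; simp [List.range'] at h
  | succ rem ih =>
    intro m res h
    rw [List.range'_succ] at h
    obtain ⟨k, hk, hbad⟩ := h
    simp only [innerA, aval_def]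
    by_cases heq : t = aval a (m : Int)
    · rw [if_pos heq]
      have hktail : k ∈ List.range' (m + 1) rem := by
        rcases List.mem_cons.mp hk with rfl | h'
        · exfalso
          rw [← heq, shiftRot_self] at hbad
          omega
        · exact h'
      have hcast : ((m : Int) + 1) = ((m + 1 : Nat) : Int) := by push_cast; ring
      rw [hcast]
      exact ih (m + 1) res ⟨k, hktail, hbad⟩
    · rw [if_neg heq]
      by_cases hbadm : shiftRot (aval a (m : Int)) t < 0
      · rw [whileA_none_of_neg _ _ hbadm]
      · have hgoodm : 0 ≤ shiftRot (aval a (m : Int)) t := by omega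
        obtain ⟨c, hc, -⟩ := whileA_some_of_nonneg _ _ hgoodm
        rw [hc]
        show innerA a t rem ((m : Int) + 1) (res + (c : Int)) = none
        have hktail : k ∈ List.range' (m + 1) rem := by
          rcases List.mem_cons.mp hk with rfl | h'
          · exact absurd hbad hbadm
          · exact h'
        have hcast : ((m : Int) + 1) = ((m + 1 : Nat) : Int) := by push_cast; ring
        rw [hcast]
        exact ih (m + 1) _ ⟨k, hktail, hbad⟩

lemma innerA_some (a : List String) (t : String) :
    ∀ (rem m : Nat) (res : Int),
      (∀ k ∈ List.range' m rem, 0 ≤ shiftRot (aval a (k : Int)) t) →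
      innerA a t rem (m : Int) res
        = some (res + ((List.range' m rem).map (fun k : Nat => shiftRot (aval a (k : Int)) t)).sum) := by
  intro rem
  induction rem with
  | zero => intro m res h; simp [innerA, List.range']
  | succ rem ih =>
    intro m res h
    rw [List.range'_succ]
    have hgoods : ∀ k ∈ List.range' (m + 1) rem, 0 ≤ shiftRot (aval a (k : Int)) t := by
      intro k hk
      exact h k (by rw [List.range'_succ]; exact List.mem_cons_of_mem _ hk)
    have hcast : ((m : Int) + 1) = ((m + 1 : Nat) : Int) := by push_cast; ring
    simp only [innerA, aval_def]
    by_cases heq : t = aval a (m : Int)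
    · rw [if_pos heq, hcast, ih (m + 1) res hgoods]
      have hzero : shiftRot (aval a (m : Int)) t = 0 := by rw [← heq, shiftRot_self]
      simp [hzero]
    · rw [if_neg heq]
      obtain ⟨c, hc, hceq⟩ := whileA_some_of_nonneg _ _
        (h m (by rw [List.range'_succ]; exact List.mem_cons_self))
      rw [hc]
      show innerA a t rem ((m : Int) + 1) (res + (c : Int)) = _
      rw [hcast, ih (m + 1) _ hgoods]
      congr 1
      rw [List.map_cons, List.sum_cons, hceq]
      ring

lemma build_none (a : List String) :
    ∀ (rem m : Nat) (ts : PySem.Set String),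
      (∃ k ∈ List.range' m rem, shiftRot (aval a (k : Int)) (aval a 0) < 0) →
      buildTargets a rem (m : Int) ts = none := by
  intro rem
  induction rem with
  | zero => intro m ts h; simp [List.range'] at h
  | succ rem ih =>
    intro m ts h
    rw [List.range'_succ] at h
    obtain ⟨k, hk, hbad⟩ := h
    simp only [buildTargets, aval_def]
    by_cases hbadm : shiftRot (aval a (m : Int)) (aval a 0) < 0
    · rw [if_pos hbadm]
    · rw [if_neg hbadm]
      show buildTargets a rem ((m : Int) + 1) (ts.add (aval a (m : Int))) = none
      have hktail : k ∈ List.range' (m + 1) rem := by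
        rcases List.mem_cons.mp hk with rfl | h'
        · exact absurd hbad hbadm
        · exact h'
      have hcast : ((m : Int) + 1) = ((m + 1 : Nat) : Int) := by push_cast; ring
      rw [hcast]
      exact ih (m + 1) _ ⟨k, hktail, hbad⟩

lemma build_some (a : List String) :
    ∀ (rem m : Nat) (ts : PySem.Set String),
      (∀ k ∈ List.range' m rem, 0 ≤ shiftRot (aval a (k : Int)) (aval a 0)) →
      buildTargets a rem (m : Int) ts
        = some (((List.range' m rem).map (fun k : Nat => aval a (k : Int))).foldl PySem.Set.add ts) := by
  intro rem
  induction rem with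
  | zero => intro m ts h; simp [buildTargets, List.range']
  | succ rem ih =>
    intro m ts h
    rw [List.range'_succ]
    simp only [buildTargets, aval_def]
    rw [if_neg (not_lt.mpr (h m (by rw [List.range'_succ]; exact List.mem_cons_self)))]
    have hcast : ((m : Int) + 1) = ((m + 1 : Nat) : Int) := by push_cast; ring
    rw [hcast, ih (m + 1) _ (fun k hk => h k (by rw [List.range'_succ]; exact List.mem_cons_of_mem _ hk))]
    rw [List.map_cons, List.foldl_cons]

lemma rowB_val (a : List String) (t : String) :
    ∀ (rem m : Nat) (tot : Int),
      rowB a t rem (m : Int) tot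
        = tot + ((List.range' m rem).map (fun k : Nat => shiftRot (aval a (k : Int)) t)).sum := by
  intro rem
  induction rem with
  | zero => intro m tot; simp [rowB, List.range']
  | succ rem ih =>
    intro m tot
    rw [List.range'_succ]
    simp only [rowB, aval_def]
    have hcast : ((m : Int) + 1) = ((m + 1 : Nat) : Int) := by push_cast; ring
    rw [hcast, ih (m + 1) _]
    rw [List.map_cons, List.sum_cons]
    ring

lemma bestB_val (a : List String) (N : Nat) :
    ∀ (ts : List String) (best : Int),
      bestB a N ts best = ts.foldl (fun acc t => min acc (rowSum a N t)) best := by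
  intro ts
  induction ts with
  | nil => intro best; rfl
  | cons t ts ih =>
    intro best
    simp only [bestB, List.foldl_cons]
    have h0 : rowB a t N ((0 : Nat) : Int) 0 = rowSum a N t := by
      rw [rowB_val a t N 0 0, rowSum]; ring
    have h0' : rowB a t N (0 : Int) 0 = rowSum a N t := by
      simpa using h0
    rw [h0', ih]

lemma foldl_min_le (f : String → Int) :
    ∀ (l : List String) (acc : Int), l.foldl (fun a v => min a (f v)) acc ≤ acc := by
  intro l
  induction l with
  | nil => intro acc; exact le_refl _
  | cons x l ih =>
    intro acc
    simp only [List.foldl_cons]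
    exact le_trans (ih _) (min_le_left _ _)

lemma foldl_min_le_mem (f : String → Int) :
    ∀ (l : List String) (acc : Int) (v : String), v ∈ l →
      l.foldl (fun a v => min a (f v)) acc ≤ f v := by
  intro l
  induction l with
  | nil => intro acc v hv; simp at hv
  | cons x l ih =>
    intro acc v hv
    simp only [List.foldl_cons]
    rcases List.mem_cons.mp hv with rfl | hv'
    · exact le_trans (foldl_min_le f l _) (min_le_right _ _)
    · exact ih _ v hv'

lemma foldl_min_cases (f : String → Int) :
    ∀ (l : List String) (acc : Int),
      l.foldl (fun a v => min a (f v)) acc = acc ∨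
        ∃ v ∈ l, l.foldl (fun a v => min a (f v)) acc = f v := by
  intro l
  induction l with
  | nil => intro acc; exact Or.inl rfl
  | cons x l ih =>
    intro acc
    simp only [List.foldl_cons]
    rcases ih (min acc (f x)) with heq | ⟨v, hv, heq⟩
    · rcases min_choice acc (f x) with hm | hm
      · exact Or.inl (by rw [heq, hm])
      · exact Or.inr ⟨x, List.mem_cons_self, by rw [heq, hm]⟩
    · exact Or.inr ⟨v, List.mem_cons_of_mem _ hv, heq⟩

lemma foldl_min_congr_mem (f : String → Int) (l1 l2 : List String)
    (h : ∀ v, v ∈ l1 ↔ v ∈ l2) (acc : Int) :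
    l1.foldl (fun a v => min a (f v)) acc = l2.foldl (fun a v => min a (f v)) acc := by
  apply le_antisymm
  · rcases foldl_min_cases f l2 acc with heq | ⟨v, hv, heq⟩
    · rw [heq]; exact foldl_min_le f l1 acc
    · rw [heq]; exact foldl_min_le_mem f l1 acc v ((h v).mpr hv)
  · rcases foldl_min_cases f l1 acc with heq | ⟨v, hv, heq⟩
    · rw [heq]; exact foldl_min_le f l2 acc
    · rw [heq]; exact foldl_min_le_mem f l2 acc v ((h v).mp hv)

lemma mem_foldl_add (v : String) :
    ∀ (l : List String) (ts : PySem.Set String),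
      v ∈ l.foldl PySem.Set.add ts ↔ v ∈ ts ∨ v ∈ l := by
  intro l
  induction l with
  | nil => intro ts; simp
  | cons x l ih =>
    intro ts
    simp only [List.foldl_cons]
    rw [ih, PySem.Set.mem_add]
    simp [List.mem_cons]
    tauto

lemma outerA_min (a : List String) (N : Nat)
    (hrows : ∀ i ∈ List.range' 0 N,
      innerA a (aval a (i : Int)) N 0 0 = some (rowSum a N (aval a (i : Int)))) :
    ∀ (rem m : Nat) (acc : Int), m + rem ≤ N →
      outerA a N rem (m : Int) acc
        = (List.range' m rem).foldl (fun acc (i : Nat) => min acc (rowSum a N (aval a (i : Int)))) acc := by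
  intro rem
  induction rem with
  | zero => intro m acc hle; simp [outerA, List.range']
  | succ rem ih =>
    intro m acc hle
    rw [List.range'_succ, List.foldl_cons]
    simp only [outerA, aval_def]
    rw [hrows m (by rw [List.mem_range'_1]; omega)]
    show outerA a N rem ((m : Int) + 1) (min acc (rowSum a N (aval a (m : Int)))) = _
    have hcast : ((m : Int) + 1) = ((m + 1 : Nat) : Int) := by push_cast; ring
    rw [hcast]
    exact ih (m + 1) _ (by omega)

-- ===== VERDICT (by name: the statement is the Claim_ definition above) =====
theorem solve_spec : Claim_equal_solve := by
  intro a n _ hpre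
  unfold Spec_solve
  rcases hpre with hn0 | ⟨hlen, hpre⟩
  · have hN : n.toNat = 0 := Int.toNat_of_nonpos hn0
    unfold solve solve_alt
    rw [hN]
    rfl
  · rcases hpre with ⟨j, hjmem, hjn, hbadB, _, _⟩ | ⟨hnle, hall⟩
    · -- the '-1' region: the first string not rotation-equivalent to a[0] is hit by both
      have hjlen : j < a.length := List.mem_range.mp hjmem
      have hbad : shiftRot (aval a (j : Int)) (aval a (0 : Int)) < 0 := by
        rw [shiftRot_neg_iff, aval_getD a j, show ((0 : Int)) = ((0 : Nat) : Int) from rfl,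
          aval_getD a 0]
        exact hbadB
      have hn1 : 0 < n := by omega
      have hjN : j < n.toNat := by omega
      obtain ⟨N', hN'⟩ : ∃ N', n.toNat = N' + 1 := ⟨n.toNat - 1, by omega⟩
      have hex : ∃ k ∈ List.range' 0 (N' + 1), shiftRot (aval a (k : Int)) (aval a 0) < 0 :=
        ⟨j, by rw [List.mem_range'_1]; omega, hbad⟩
      unfold solve solve_alt
      rw [hN']
      have hinner : innerA a (aval a (0 : Int)) (N' + 1) ((0 : Nat) : Int) 0 = none :=
        innerA_none a _ (N' + 1) 0 0 hex
      have hbuild : buildTargets a (N' + 1) ((0 : Nat) : Int) PySem.Set.empty = none :=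
        build_none a (N' + 1) 0 PySem.Set.empty hex
      simp only [Nat.cast_zero] at hinner hbuild
      simp only [outerA, aval_def]
      rw [hinner, hbuild]
    · -- the all-rotation-equivalent region: both compute the same minimum
      have hNlen : n.toNat ≤ a.length := by omega
      have hgood : ∀ k ∈ List.range' 0 n.toNat,
          (aval a (k : Int)).toList ~r (aval a (0 : Int)).toList := by
        intro k hk
        rw [List.mem_range'_1] at hk
        have hkl : k < a.length := by omega
        have hkn : (k : Int) < n := by omega
        apply (rotEqB_iff _ _).mp
        rw [aval_getD a k, show ((0 : Int)) = ((0 : Nat) : Int) from rfl, aval_getD a 0]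
        exact hall k (List.mem_range.mpr hkl) hkn
      have hpair : ∀ i ∈ List.range' 0 n.toNat, ∀ k ∈ List.range' 0 n.toNat,
          0 ≤ shiftRot (aval a (k : Int)) (aval a (i : Int)) := by
        intro i hi k hk
        exact (shiftRot_nonneg_iff _ _).mpr ((hgood k hk).trans (hgood i hi).symm)
      have hrows : ∀ i ∈ List.range' 0 n.toNat,
          innerA a (aval a (i : Int)) n.toNat 0 0 = some (rowSum a n.toNat (aval a (i : Int))) := by
        intro i hi
        have := innerA_some a (aval a (i : Int)) n.toNat 0 0 (fun k hk => hpair i hi k hk)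
        simpa [rowSum] using this
      unfold solve solve_alt
      have hA := outerA_min a n.toNat hrows n.toNat 0 ((10 : Int) ^ 9) (by omega)
      have hB := build_some a n.toNat 0 PySem.Set.empty
        (fun k hk => (shiftRot_nonneg_iff _ _).mpr (hgood k hk))
      simp only [Nat.cast_zero] at hA hB
      rw [hA, hB]
      show _ = bestB a n.toNat
        (((List.range' 0 n.toNat).map (fun k : Nat => aval a (k : Int))).foldl
          PySem.Set.add PySem.Set.empty) ((10 : Int) ^ 9)
      rw [bestB_val]
      have hmap : ((List.range' 0 n.toNat).map (fun i : Nat => aval a (i : Int))).foldl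
            (fun acc t => min acc (rowSum a n.toNat t)) ((10 : Int) ^ 9)
          = (List.range' 0 n.toNat).foldl
            (fun acc (i : Nat) => min acc (rowSum a n.toNat (aval a (i : Int)))) ((10 : Int) ^ 9) := by
        rw [List.foldl_map]
      rw [← hmap]
      apply foldl_min_congr_mem
      intro v
      rw [mem_foldl_add]
      simp [PySem.Set.empty]
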